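-- pv_equiv track=rewrite | github.com/chu817/Train-Traffic-Control | backend/test_schedule_models.py | analyze_track_conflicts
-- ===== SOURCE A (Python) =====
-- def analyze_track_conflicts(schedule, tracks):
--     """Analyze track usage and potential conflicts"""
--     track_usage = {}
--     conflicts = 0
--
--     for train_id, entry in schedule.items():
--         segments = entry.get('segments', [])
--         for segment in segments:
--             track = segment.get('track', 'unknown')
--             start_time = segment.get('start', '')
--             end_time = segment.get('end', '')
--
--             if track not in track_usage:
--                 track_usage[track] = []
--
--             # Check for overlaps with existing usage
--             for existing_start, existing_end, existing_train in track_usage[track]: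
--                 if (start_time < existing_end and end_time > existing_start):
--                     conflicts += 1
--
--             track_usage[track].append((start_time, end_time, train_id))
--
--     return conflicts, len(track_usage), sum(len(usage) for usage in track_usage.values())
-- ===== SOURCE B (Python) =====
-- def analyze_track_conflicts(schedule, tracks):
--     """Analyze track usage and potential conflicts"""
--     segs = [(seg.get('track', 'unknown'), seg.get('start', ''), seg.get('end', ''))
--             for entry in schedule.values()
--             for seg in entry.get('segments', [])]
--     conflicts = 0
--     for i, (t, s, e) in enumerate(segs):
--         for t2, s2, e2 in segs[i + 1:]:
--             if t2 == t and s < e2 and s2 < e: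
--                 conflicts += 1
--     distinct = set()
--     for t, _, _ in segs:
--         distinct.add(t)
--     return conflicts, len(distinct), len(segs)
-- ===== Notes on version B (the rewrite author's own statement) =====
-- stated objective: alternative
-- what changed: B drops A's incrementally-built dict of per-track usage histories: it extracts all (track, start, end) triples in one flat pass, counts conflicting pairs with a single forward pairwise scan using an explicit track-equality test, and gets the two tallies in closed form (a set of track names and the length of the flat segment list).
import Mathlib
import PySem

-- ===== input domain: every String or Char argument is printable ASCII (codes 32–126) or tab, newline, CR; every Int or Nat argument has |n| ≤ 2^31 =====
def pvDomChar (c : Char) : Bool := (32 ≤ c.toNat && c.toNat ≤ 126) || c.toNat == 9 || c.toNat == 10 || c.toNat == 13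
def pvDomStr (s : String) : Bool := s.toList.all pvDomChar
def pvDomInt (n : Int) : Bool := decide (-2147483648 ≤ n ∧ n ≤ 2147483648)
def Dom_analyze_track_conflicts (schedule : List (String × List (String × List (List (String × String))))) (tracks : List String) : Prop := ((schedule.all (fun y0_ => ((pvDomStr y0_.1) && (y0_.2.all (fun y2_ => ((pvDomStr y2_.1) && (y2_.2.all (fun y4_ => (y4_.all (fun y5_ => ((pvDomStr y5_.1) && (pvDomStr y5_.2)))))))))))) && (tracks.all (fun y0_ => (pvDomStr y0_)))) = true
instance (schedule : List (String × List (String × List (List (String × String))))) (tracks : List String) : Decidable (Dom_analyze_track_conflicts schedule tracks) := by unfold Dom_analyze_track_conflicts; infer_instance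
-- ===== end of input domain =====

-- B replaces A's incremental dict of per-track histories by a flat extraction pass, a forward
-- pairwise scan with an explicit track-equality test, and closed forms for the two tallies
-- (a set of track names and the length of the flat segment list); objective: alternative.

-- ===== PORT A =====
def analyze_track_conflicts (schedule : List (String × List (String × List (List (String × String))))) (tracks : List String) : List Int :=
  -- state: (track_usage, conflicts)
  let res : PySem.Dict String (List (String × String × String)) × Int :=
    schedule.foldl (fun st p =>
      let train_id := p.1
      let segments := (PySem.Dict.mk p.2).getD "segments" []
      segments.foldl (fun st seg =>
        let track_usage := st.1
        let track := (PySem.Dict.mk seg).getD "track" "unknown"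
        let start_time := (PySem.Dict.mk seg).getD "start" ""
        let end_time := (PySem.Dict.mk seg).getD "end" ""
        let track_usage := if track_usage.contains track = false then track_usage.insert track [] else track_usage
        -- for existing_start, existing_end, existing_train in track_usage[track]: …
        let conflicts := (track_usage.getD track []).foldl (fun c u =>
          if start_time < u.2.1 ∧ end_time > u.1 then c + 1 else c) st.2
        let track_usage := track_usage.insert track (track_usage.getD track [] ++ [(start_time, end_time, train_id)])
        (track_usage, conflicts)) st) (PySem.Dict.empty, 0)
  [res.2, (res.1.size : Int), res.1.values.foldl (fun s usage => s + (usage.length : Int)) 0]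

-- ===== PORT B =====
def analyze_track_conflicts_alt (schedule : List (String × List (String × List (List (String × String))))) (tracks : List String) : List Int :=
  let segs : List (String × String × String) :=
    schedule.flatMap (fun p =>
      ((PySem.Dict.mk p.2).getD "segments" []).map (fun seg =>
        ((PySem.Dict.mk seg).getD "track" "unknown",
         (PySem.Dict.mk seg).getD "start" "",
         (PySem.Dict.mk seg).getD "end" "")))
  let conflicts : Int :=
    (PySem.List.enumerate segs).foldl (fun c q =>
      (PySem.List.slice segs (some (q.1 + 1)) none).foldl (fun c y =>
        if y.1 = q.2.1 ∧ q.2.2.1 < y.2.2 ∧ y.2.1 < q.2.2.2 then c + 1 else c) c) 0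
  let distinct : PySem.Set String := segs.foldl (fun s x => PySem.Set.add s x.1) PySem.Set.empty
  [conflicts, (distinct.length : Int), (segs.length : Int)]

-- ===== PRECONDITION & SPEC =====
def Spec_analyze_track_conflicts (schedule : List (String × List (String × List (List (String × String))))) (tracks : List String) (out : List Int) : Prop := out = analyze_track_conflicts_alt schedule tracks
instance (schedule : List (String × List (String × List (List (String × String))))) (tracks : List String) (out : List Int) : Decidable (Spec_analyze_track_conflicts schedule tracks out) := by unfold Spec_analyze_track_conflicts; infer_instance

-- ===== CLAIM (what is proved, stated in full; the proofs are below) =====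
def Claim_equal_analyze_track_conflicts : Prop := ∀ (schedule : List (String × List (String × List (List (String × String))))) (tracks : List String), Dom_analyze_track_conflicts schedule tracks → Spec_analyze_track_conflicts schedule tracks (analyze_track_conflicts schedule tracks)

-- ===== LEMMAS AND PROOFS =====

-- flat element: (train_id, segment dict)
abbrev PvE := String × List (String × String)

def pvTr (x : PvE) : String := (PySem.Dict.mk x.2).getD "track" "unknown"
def pvSt (x : PvE) : String := (PySem.Dict.mk x.2).getD "start" ""
def pvEn (x : PvE) : String := (PySem.Dict.mk x.2).getD "end" ""
def pvVal (x : PvE) : String × String × String := (pvSt x, pvEn x, x.1)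
def pvTrip (x : PvE) : String × String × String := (pvTr x, pvSt x, pvEn x)

-- B's overlap test: x is the earlier segment, y the later one
def pvOv (x y : String × String × String) : Bool :=
  decide (y.1 = x.1 ∧ x.2.1 < y.2.2 ∧ y.2.1 < x.2.2)

-- forward pair count (B's double loop, structurally)
def pvF : List (String × String × String) → Int
  | [] => 0
  | x :: r => (r.countP (pvOv x) : Int) + pvF r

-- A's flat step (d1 = the dict after the "if track not in track_usage" line)
def pvD1 (d : PySem.Dict String (List (String × String × String))) (t : String) :
    PySem.Dict String (List (String × String × String)) :=
  if d.contains t = false then d.insert t [] else d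

def pvStepA (st : PySem.Dict String (List (String × String × String)) × Int) (x : PvE) :
    PySem.Dict String (List (String × String × String)) × Int :=
  ((pvD1 st.1 (pvTr x)).insert (pvTr x) ((pvD1 st.1 (pvTr x)).getD (pvTr x) [] ++ [pvVal x]),
   ((pvD1 st.1 (pvTr x)).getD (pvTr x) []).foldl
     (fun c u => if pvSt x < u.2.1 ∧ pvEn x > u.1 then c + 1 else c) st.2)

lemma pvF_concat (l : List (String × String × String)) (y : String × String × String) :
    pvF (l ++ [y]) = pvF l + (l.countP (fun x => pvOv x y) : Int) := by
  induction l with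
  | nil => simp [pvF]
  | cons a l ih =>
    simp only [List.cons_append, pvF, ih, List.countP_append, List.countP_cons, List.countP_nil]
    push_cast
    ring

lemma pvFoldl_count {α : Type} (l : List α) (P : α → Prop) [DecidablePred P] (c : Int) :
    l.foldl (fun c u => if P u then c + 1 else c) c = c + (l.countP (fun u => decide (P u)) : Int) := by
  induction l generalizing c with
  | nil => simp
  | cons a l ih =>
    simp only [List.foldl_cons, List.countP_cons, ih]
    by_cases h : P a <;> simp [h] <;> push_cast <;> ring

lemma pvFoldl_sum {α : Type} (l : List α) (f : α → Int) (c : Int) :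
    l.foldl (fun s u => s + f u) c = c + (l.map f).sum := by
  induction l generalizing c with
  | nil => simp
  | cons a l ih => simp [ih]; ring

-- keys of a dict after A's step, phrased with Set.add
lemma pvSum_indicator (t : String) (K : List String) :
    (K.map (fun k => if (t == k) = true then 1 else 0)).sum = K.count t := by
  induction K with
  | nil => simp
  | cons a K ihK =>
    simp only [List.map_cons, List.sum_cons, List.count_cons, ihK]
    by_cases h : a = t
    · subst h; simp [Nat.add_comm]
    · simp [h, Ne.symm h]

lemma pvSum_counts (ts K : List String) (hn : K.Nodup) (hsub : ∀ t ∈ ts, t ∈ K) :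
    (K.map (fun k => ts.countP (fun a => a == k))).sum = ts.length := by
  induction ts with
  | nil => simp
  | cons t ts ih =>
    have hsub' : ∀ a ∈ ts, a ∈ K := fun a ha => hsub a (List.mem_cons_of_mem _ ha)
    have hone : (K.map (fun k => if (t == k) = true then 1 else 0)).sum = 1 := by
      rw [pvSum_indicator]
      exact List.count_eq_one_of_mem hn (hsub t List.mem_cons_self)
    calc (K.map (fun k => (t :: ts).countP (fun a => a == k))).sum
        = (K.map (fun k => ts.countP (fun a => a == k) + if (t == k) = true then 1 else 0)).sum := by
          congr 1; apply List.map_congr_left; intro k _; simp [List.countP_cons]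
      _ = (K.map (fun k => ts.countP (fun a => a == k))).sum + (K.map (fun k => if (t == k) = true then 1 else 0)).sum := by
          rw [← List.sum_map_add]
      _ = ts.length + 1 := by rw [ih hsub', hone]
      _ = (t :: ts).length := by simp [Nat.add_comm]

lemma pvValues_eq (d : PySem.Dict String (List (String × String × String))) (h : d.keys.Nodup) :
    d.values = d.keys.map (fun k => d.getD k []) := by
  show d.items.map (·.2) = (d.items.map (·.1)).map (fun k => d.getD k [])
  rw [List.map_map]
  apply List.map_congr_left
  rintro ⟨k, v⟩ hp
  exact (PySem.Dict.getD_of_mem_items d hp h []).symm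

-- B's enumerate/slice double loop computes the forward pair count pvF
lemma pvB_count (L : List (String × String × String)) :
    ∀ (s : Nat) (l : List (String × String × String)) (c : Int), l = L.drop s →
    (PySem.List.enumerate l (s : Int)).foldl (fun c q =>
      (PySem.List.slice L (some (q.1 + 1)) none).foldl (fun c y =>
        if y.1 = q.2.1 ∧ q.2.2.1 < y.2.2 ∧ y.2.1 < q.2.2.2 then c + 1 else c) c) c = c + pvF l := by
  intro s l
  induction l generalizing s with
  | nil => intro c _; simp [PySem.List.enumerate, pvF]
  | cons x l' ih =>
    intro c hl
    have hdrop : l' = L.drop (s + 1) := by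
      have := congrArg List.tail hl
      simpa [List.tail_drop] using this
    rw [PySem.List.enumerate_cons, List.foldl_cons]
    have hcast : (s : Int) + 1 = ((s + 1 : Nat) : Int) := by push_cast; ring
    have hslice : PySem.List.slice L (some ((s : Int) + 1)) none = l' := by
      rw [hcast, PySem.List.slice_from_natCast, ← hdrop]
    simp only [hslice]
    rw [pvFoldl_count l' (fun y => y.1 = x.1 ∧ x.2.1 < y.2.2 ∧ y.2.1 < x.2.2) c]
    rw [hcast, ih (s + 1) _ hdrop]
    have : l'.countP (fun y => decide (y.1 = x.1 ∧ x.2.1 < y.2.2 ∧ y.2.1 < x.2.2)) = l'.countP (pvOv x) := by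
      apply List.countP_congr; intro y _; simp [pvOv]
    rw [this]
    simp only [pvF]
    push_cast
    ring

-- behaviour of PySem.Set.add as a plain list
lemma pvSet_add (s : PySem.Set String) (x : String) :
    PySem.Set.add s x = if x ∈ s then s else s ++ [x] := by
  simp [PySem.Set.add]

-- the per-element predicate A applies to the stored usage list equals pvOv on the triples
lemma pvPred_eq (x y : PvE) :
    ((decide (pvSt x < (pvVal y).2.1 ∧ pvEn x > (pvVal y).1)) && (pvTr y == pvTr x))
      = pvOv (pvTrip y) (pvTrip x) := by
  simp only [pvVal, pvOv, pvTrip, gt_iff_lt]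
  rw [Bool.eq_iff_iff]
  simp only [Bool.and_eq_true, decide_eq_true_eq, beq_iff_eq]
  constructor
  · rintro ⟨⟨a, b⟩, cc⟩; exact ⟨cc.symm, b, a⟩
  · rintro ⟨cc, b, a⟩; exact ⟨⟨a, b⟩, cc.symm⟩

lemma pvD1_getD (d : PySem.Dict String (List (String × String × String))) (t u : String) :
    (pvD1 d t).getD u [] = d.getD u [] := by
  unfold pvD1
  split
  · rename_i hc
    rw [PySem.Dict.getD_insert]
    split
    · rename_i hu; subst hu; exact (PySem.Dict.getD_of_not_contains d [] hc).symm
    · rfl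
  · rfl

lemma pvD1_keys (d : PySem.Dict String (List (String × String × String))) (t : String) :
    (pvD1 d t).keys = if d.contains t = false then d.keys ++ [t] else d.keys := by
  unfold pvD1
  split
  · rename_i hc; exact PySem.Dict.keys_insert_of_not_contains d [] hc
  · rfl

lemma pvD1_contains_self (d : PySem.Dict String (List (String × String × String))) (t : String) :
    (pvD1 d t).contains t = true := by
  unfold pvD1
  split
  · exact PySem.Dict.contains_insert_self d t []
  · rename_i hc; simpa using hc

lemma pvD1_nodup (d : PySem.Dict String (List (String × String × String))) (t : String)
    (h : d.keys.Nodup) : (pvD1 d t).keys.Nodup := by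
  unfold pvD1
  split
  · exact PySem.Dict.nodup_keys_insert _ _ _ h
  · exact h

-- one step of A, from a state described by the processed prefix p
lemma pvStepA_char (d : PySem.Dict String (List (String × String × String))) (c : Int) (p : List PvE) (x : PvE)
    (h1 : ∀ t, d.getD t [] = (p.filter (fun y => pvTr y == t)).map pvVal)
    (h2 : d.keys = (p.map pvTr).foldl PySem.Set.add PySem.Set.empty)
    (h3 : d.keys.Nodup)
    (h4 : c = pvF (p.map pvTrip)) :
    (∀ t, (pvStepA (d, c) x).1.getD t [] = ((p ++ [x]).filter (fun y => pvTr y == t)).map pvVal)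
    ∧ (pvStepA (d, c) x).1.keys = ((p ++ [x]).map pvTr).foldl PySem.Set.add PySem.Set.empty
    ∧ (pvStepA (d, c) x).1.keys.Nodup
    ∧ (pvStepA (d, c) x).2 = pvF ((p ++ [x]).map pvTrip) := by
  unfold pvStepA
  have hmem : d.contains (pvTr x) = decide (pvTr x ∈ d.keys) :=
    PySem.Dict.contains_eq_decide_mem_keys d (pvTr x)
  have husage : (pvD1 d (pvTr x)).getD (pvTr x) []
      = (p.filter (fun y => pvTr y == pvTr x)).map pvVal := by
    rw [pvD1_getD, h1]
  refine ⟨?_, ?_, ?_, ?_⟩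
  · intro u
    simp only
    rw [PySem.Dict.getD_insert, husage]
    by_cases hu : u = pvTr x
    · subst hu
      simp [List.filter_append, List.map_append]
    · rw [if_neg hu, pvD1_getD, h1]
      have hnil : List.filter (fun y => pvTr y == u) [x] = [] := by
        simp; exact fun h => absurd h.symm hu
      simp [List.filter_append, hnil]
  · simp only
    rw [PySem.Dict.keys_insert_of_contains _ _ (pvD1_contains_self d (pvTr x))]
    rw [pvD1_keys, List.map_append, List.foldl_append, ← h2]
    simp only [List.map_cons, List.map_nil, List.foldl_cons, List.foldl_nil]
    rw [pvSet_add]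
    by_cases hm : pvTr x ∈ d.keys
    · simp [hm, hmem]
    · simp [hm, hmem]
  · simp only
    exact PySem.Dict.nodup_keys_insert _ _ _ (pvD1_nodup d (pvTr x) h3)
  · simp only
    rw [pvFoldl_count, husage, h4]
    rw [List.map_append, List.map_cons, List.map_nil]
    rw [pvF_concat]
    congr 1
    rw [List.countP_map, List.countP_filter]
    rw [List.countP_map]
    congr 1
    apply List.countP_congr
    intro y _
    simp only [Function.comp_apply]
    rw [pvPred_eq x y]

-- the main invariant for A's flat fold
lemma pvA_inv (l : List PvE) (d : PySem.Dict String (List (String × String × String))) (c : Int)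
    (p : List PvE)
    (h1 : ∀ t, d.getD t [] = (p.filter (fun y => pvTr y == t)).map pvVal)
    (h2 : d.keys = (p.map pvTr).foldl PySem.Set.add PySem.Set.empty)
    (h3 : d.keys.Nodup)
    (h4 : c = pvF (p.map pvTrip)) :
    (∀ t, (l.foldl pvStepA (d, c)).1.getD t [] = ((p ++ l).filter (fun y => pvTr y == t)).map pvVal)
    ∧ (l.foldl pvStepA (d, c)).1.keys = ((p ++ l).map pvTr).foldl PySem.Set.add PySem.Set.empty
    ∧ (l.foldl pvStepA (d, c)).1.keys.Nodup
    ∧ (l.foldl pvStepA (d, c)).2 = pvF ((p ++ l).map pvTrip) := by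
  induction l generalizing d c p with
  | nil => simpa using ⟨h1, h2, h3, h4⟩
  | cons x l' ih =>
    obtain ⟨g1, g2, g3, g4⟩ := pvStepA_char d c p x h1 h2 h3 h4
    have := ih (pvStepA (d, c) x).1 (pvStepA (d, c) x).2 (p ++ [x]) g1 g2 g3 g4
    simpa [List.append_assoc] using this

lemma pvSum_cast (K : List String) (f : String → Nat) :
    (K.map (fun k => (f k : Int))).sum = ((K.map f).sum : Int) := by
  induction K with
  | nil => simp
  | cons a K ih => simp only [List.map_cons, List.sum_cons, ih]; push_cast; ring

theorem analyze_track_conflicts_spec : Claim_equal_analyze_track_conflicts := by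
  unfold Claim_equal_analyze_track_conflicts
  intro schedule tracks _
  unfold Spec_analyze_track_conflicts
  have hA : analyze_track_conflicts schedule tracks
      = [((schedule.flatMap (fun p => ((PySem.Dict.mk p.2).getD "segments" []).map (fun seg => (p.1, seg)))).foldl pvStepA (PySem.Dict.empty, 0)).2,
         (((schedule.flatMap (fun p => ((PySem.Dict.mk p.2).getD "segments" []).map (fun seg => (p.1, seg)))).foldl pvStepA (PySem.Dict.empty, 0)).1.size : Int),
         ((schedule.flatMap (fun p => ((PySem.Dict.mk p.2).getD "segments" []).map (fun seg => (p.1, seg)))).foldl pvStepA (PySem.Dict.empty, 0)).1.values.foldl (fun s usage => s + (usage.length : Int)) 0] := by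
    unfold analyze_track_conflicts
    rw [List.foldl_flatMap]
    simp only [List.foldl_map]
    rfl
  have hsegs : (schedule.flatMap (fun p =>
        ((PySem.Dict.mk p.2).getD "segments" []).map (fun seg =>
          ((PySem.Dict.mk seg).getD "track" "unknown",
           (PySem.Dict.mk seg).getD "start" "",
           (PySem.Dict.mk seg).getD "end" ""))))
      = (schedule.flatMap (fun p => ((PySem.Dict.mk p.2).getD "segments" []).map (fun seg => (p.1, seg)))).map pvTrip := by
    rw [List.map_flatMap]
    simp only [List.map_map]
    rfl
  have hB : analyze_track_conflicts_alt schedule tracks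
      = [pvF ((schedule.flatMap (fun p => ((PySem.Dict.mk p.2).getD "segments" []).map (fun seg => (p.1, seg)))).map pvTrip),
         ((((schedule.flatMap (fun p => ((PySem.Dict.mk p.2).getD "segments" []).map (fun seg => (p.1, seg)))).map pvTr).foldl PySem.Set.add PySem.Set.empty).length : Int),
         (((schedule.flatMap (fun p => ((PySem.Dict.mk p.2).getD "segments" []).map (fun seg => (p.1, seg)))).map pvTrip).length : Int)] := by
    unfold analyze_track_conflicts_alt
    simp only [hsegs]
    have hc := pvB_count ((schedule.flatMap (fun p => ((PySem.Dict.mk p.2).getD "segments" []).map (fun seg => (p.1, seg)))).map pvTrip)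
      0 ((schedule.flatMap (fun p => ((PySem.Dict.mk p.2).getD "segments" []).map (fun seg => (p.1, seg)))).map pvTrip) 0 (by simp)
    simp only [Nat.cast_zero] at hc
    rw [hc]
    rw [← List.foldl_map (f := fun (y : String × String × String) => y.1) (g := PySem.Set.add)]
    simp only [List.map_map]
    norm_num
    rfl
  rw [hA, hB]
  obtain ⟨k1, k2, k3, k4⟩ := pvA_inv
    (schedule.flatMap (fun p => ((PySem.Dict.mk p.2).getD "segments" []).map (fun seg => (p.1, seg))))
    PySem.Dict.empty 0 []
    (by intro t; simp [PySem.Dict.getD_empty])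
    (by simp [PySem.Dict.keys_empty])
    PySem.Dict.nodup_keys_empty
    (by simp [pvF])
  simp only [List.nil_append] at k1 k2 k3 k4
  have hkeylen : ((schedule.flatMap (fun p => ((PySem.Dict.mk p.2).getD "segments" []).map (fun seg => (p.1, seg)))).foldl pvStepA (PySem.Dict.empty, 0)).1.size
      = ((schedule.flatMap (fun p => ((PySem.Dict.mk p.2).getD "segments" []).map (fun seg => (p.1, seg)))).foldl pvStepA (PySem.Dict.empty, 0)).1.keys.length := by
    simp [PySem.Dict.size, PySem.Dict.keys]
  have hsum : ((schedule.flatMap (fun p => ((PySem.Dict.mk p.2).getD "segments" []).map (fun seg => (p.1, seg)))).foldl pvStepA (PySem.Dict.empty, 0)).1.values.foldl (fun s usage => s + (usage.length : Int)) 0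
      = (((schedule.flatMap (fun p => ((PySem.Dict.mk p.2).getD "segments" []).map (fun seg => (p.1, seg)))).map pvTrip).length : Int) := by
    rw [pvFoldl_sum]
    rw [pvValues_eq _ k3]
    have hmapeq : (((schedule.flatMap (fun p => ((PySem.Dict.mk p.2).getD "segments" []).map (fun seg => (p.1, seg)))).foldl pvStepA (PySem.Dict.empty, 0)).1.keys.map
          (fun k => ((schedule.flatMap (fun p => ((PySem.Dict.mk p.2).getD "segments" []).map (fun seg => (p.1, seg)))).foldl pvStepA (PySem.Dict.empty, 0)).1.getD k [])).map (fun u => (u.length : Int))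
        = ((schedule.flatMap (fun p => ((PySem.Dict.mk p.2).getD "segments" []).map (fun seg => (p.1, seg)))).foldl pvStepA (PySem.Dict.empty, 0)).1.keys.map
            (fun k => ((((schedule.flatMap (fun p => ((PySem.Dict.mk p.2).getD "segments" []).map (fun seg => (p.1, seg)))).map pvTr).countP (fun a => a == k)) : Int)) := by
      rw [List.map_map]
      apply List.map_congr_left
      intro k _
      simp only [Function.comp_apply, k1, List.length_map]
      rw [List.countP_map]
      simp [Function.comp_def, List.countP_eq_length_filter]
    rw [hmapeq, pvSum_cast]
    rw [pvSum_counts _ _ k3]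
    · simp
    · intro t ht
      rw [k2]
      have hof : List.foldl PySem.Set.add (PySem.Set.empty : PySem.Set String)
          ((schedule.flatMap (fun p => ((PySem.Dict.mk p.2).getD "segments" []).map (fun seg => (p.1, seg)))).map pvTr)
          = PySem.Set.ofList ((schedule.flatMap (fun p => ((PySem.Dict.mk p.2).getD "segments" []).map (fun seg => (p.1, seg)))).map pvTr) :=
        (PySem.Set.ofList_eq_foldl _).symm
      rw [hof]
      exact (PySem.Set.mem_ofList _ t).mpr ht
  rw [hkeylen, k2, k4, hsum]
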